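-- pv_equiv track=rewrite | github.com/ZhangCheng-zh/blog | blog_all_python_combined.py | wasAliveFast
-- ===== SOURCE A (Python) =====
-- from bisect import bisect_left
-- from bisect import bisect_left
-- from bisect import bisect_left
--
-- def wasAliveFast(records, key, start, bucketSize = 100, bucketCount = 5, needConsecutive = 3):
--     tw = [t for k, t in records if k == key]
--     tw.sort()
--
--     buckets = [False] * bucketCount
--     for i in range(bucketCount):
--         left = start + i * bucketSize
--         right = left + bucketSize - 1
--         idx = bisect_left(tw, left)
--         # if has record in target bucket of tw, heartbeat true
--         buckets[i] = (idx < len(tw) and tw[idx] <= right)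
--
--
--     run = 0
--     for b in buckets:
--         if b:
--             run += 1
--         else:
--             run = 0
--         if run >= needConsecutive:
--             return True
--     return False
-- ===== SOURCE B (Python) =====
-- def wasAliveFast(records, key, start, bucketSize = 100, bucketCount = 5, needConsecutive = 3):
--     # One pass over records: mark bucket (t - start) // bucketSize directly
--     # (no sort, no bisect); a non-positive bucketSize makes every bucket an
--     # empty interval, so nothing is marked.
--     alive = [False] * bucketCount
--     if bucketSize > 0:
--         for k, t in records:
--             if k == key:
--                 j = (t - start) // bucketSize
--                 if 0 <= j < bucketCount:
--                     alive[j] = True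
--     run = 0
--     for b in alive:
--         run = run + 1 if b else 0
--         if run >= needConsecutive:
--             return True
--     return False
-- ===== Notes on version B (the rewrite author's own statement) =====
-- stated objective: faster
-- what changed: B replaces A's sort of the key's timestamps plus a bisect per bucket with a single unsorted pass that marks bucket index (t-start)//bucketSize directly, then runs the same consecutive-run scan.
import Mathlib
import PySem

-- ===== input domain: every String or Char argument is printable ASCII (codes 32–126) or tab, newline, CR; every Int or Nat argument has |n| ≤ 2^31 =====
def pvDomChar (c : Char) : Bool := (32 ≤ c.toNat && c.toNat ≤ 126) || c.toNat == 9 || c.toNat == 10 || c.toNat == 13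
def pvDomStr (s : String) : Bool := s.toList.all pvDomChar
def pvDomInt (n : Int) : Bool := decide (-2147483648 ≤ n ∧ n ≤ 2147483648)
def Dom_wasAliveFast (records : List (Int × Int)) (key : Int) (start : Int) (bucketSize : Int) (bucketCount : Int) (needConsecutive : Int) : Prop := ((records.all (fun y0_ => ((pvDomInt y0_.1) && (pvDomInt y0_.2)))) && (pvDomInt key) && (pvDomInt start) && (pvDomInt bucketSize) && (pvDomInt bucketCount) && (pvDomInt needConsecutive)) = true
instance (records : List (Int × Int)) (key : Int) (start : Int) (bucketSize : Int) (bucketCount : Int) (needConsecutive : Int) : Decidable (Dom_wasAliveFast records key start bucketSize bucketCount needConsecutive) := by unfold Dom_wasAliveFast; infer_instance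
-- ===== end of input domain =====

-- B marks bucket (t-start)//bucketSize in one unsorted pass instead of sorting the key's
-- timestamps and bisecting per bucket; same consecutive-run scan, same result (objective: faster).

-- ===== PORT A =====
-- the trailing 'run' loop of both Pythons (identical line for line in A and B)
def pvRunScan : List Bool → Int → Int → Bool
  | [], _, _ => false
  | b :: rest, run, need =>
    let run' := if b then run + 1 else 0
    if need ≤ run' then true else pvRunScan rest run' need

def wasAliveFast (records : List (Int × Int)) (key : Int) (start : Int) (bucketSize : Int) (bucketCount : Int) (needConsecutive : Int) : Bool :=
  let tw := PySem.List.sorted ((records.filter (fun p => p.1 == key)).map (fun p => p.2)) (fun x => x) false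
  let buckets := (PySem.List.pyRange 0 bucketCount 1).map (fun i =>
    let left := start + i * bucketSize
    let right := left + bucketSize - 1
    let idx := PySem.List.bisectLeft tw left
    decide (idx < tw.length ∧ tw.getD idx 0 ≤ right))
  pvRunScan buckets 0 needConsecutive

-- ===== PORT B =====
def wasAliveFast_alt (records : List (Int × Int)) (key : Int) (start : Int) (bucketSize : Int) (bucketCount : Int) (needConsecutive : Int) : Bool :=
  let init := List.replicate bucketCount.toNat false
  let alive :=
    if bucketSize > 0 then
      records.foldl (fun acc p =>
        if p.1 == key then
          let j := PySem.Int.floordiv (p.2 - start) bucketSize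
          if 0 ≤ j ∧ j < bucketCount then acc.set j.toNat true else acc
        else acc) init
    else init
  pvRunScan alive 0 needConsecutive

-- ===== PRECONDITION & SPEC =====
def Spec_wasAliveFast (records : List (Int × Int)) (key : Int) (start : Int) (bucketSize : Int) (bucketCount : Int) (needConsecutive : Int) (out : Bool) : Prop := out = wasAliveFast_alt records key start bucketSize bucketCount needConsecutive
instance (records : List (Int × Int)) (key : Int) (start : Int) (bucketSize : Int) (bucketCount : Int) (needConsecutive : Int) (out : Bool) : Decidable (Spec_wasAliveFast records key start bucketSize bucketCount needConsecutive out) := by unfold Spec_wasAliveFast; infer_instance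

-- ===== CLAIM (what is proved, stated in full; the proofs are below) =====
def Claim_equal_wasAliveFast : Prop := ∀ (records : List (Int × Int)) (key : Int) (start : Int) (bucketSize : Int) (bucketCount : Int) (needConsecutive : Int), Dom_wasAliveFast records key start bucketSize bucketCount needConsecutive → Spec_wasAliveFast records key start bucketSize bucketCount needConsecutive (wasAliveFast records key start bucketSize bucketCount needConsecutive)

-- ===== LEMMAS AND PROOFS =====

-- A's per-bucket test 'idx < len(tw) and tw[idx] <= right' on a sorted tw is
-- 'some element of tw lies in [left, right]'.
theorem bisect_window_iff (tw : List Int) (hs : tw.Pairwise (· ≤ ·)) (left right : Int) :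
    (PySem.List.bisectLeft tw left < tw.length ∧ tw.getD (PySem.List.bisectLeft tw left) 0 ≤ right)
    ↔ ∃ t ∈ tw, left ≤ t ∧ t ≤ right := by
  obtain ⟨hle, hlt, hge⟩ := PySem.List.bisectLeft_spec tw left hs
  set idx := PySem.List.bisectLeft tw left with hidx
  constructor
  · rintro ⟨h1, h2⟩
    exact ⟨tw[idx], List.getElem_mem h1, hge idx h1 le_rfl, by rwa [List.getD_eq_getElem tw 0 h1] at h2⟩
  · rintro ⟨t, ht, h1, h2⟩
    obtain ⟨j, hj, rfl⟩ := List.mem_iff_getElem.mp ht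
    have hji : idx ≤ j := by
      by_contra h
      exact absurd h1 (not_le.mpr (hlt j hj (by omega)))
    have hlen : idx < tw.length := lt_of_le_of_lt hji hj
    refine ⟨hlen, ?_⟩
    rw [List.getD_eq_getElem tw 0 hlen]
    have := List.pairwise_iff_getElem.mp hs
    rcases eq_or_lt_of_le hji with h | h
    · simp [h]; omega
    · exact le_trans (this idx j hlen hj h) h2

-- B's marking fold preserves the length of the bucket array.
theorem mark_length (key start bucketSize bucketCount : Int) :
    ∀ (rs : List (Int × Int)) (acc : List Bool),
    (rs.foldl (fun acc p =>
        if p.1 == key then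
          let j := PySem.Int.floordiv (p.2 - start) bucketSize
          if 0 ≤ j ∧ j < bucketCount then acc.set j.toNat true else acc
        else acc) acc).length = acc.length := by
  intro rs
  induction rs with
  | nil => intro acc; rfl
  | cons p rs ih =>
    intro acc
    simp only [List.foldl_cons]
    rw [ih]
    split_ifs <;> simp

-- Slot k of B's marking fold: its old value, or some record of the key maps to bucket k.
theorem mark_getD (key start bucketSize bucketCount : Int) (k : Nat) :
    ∀ (rs : List (Int × Int)) (acc : List Bool),
    acc.length = bucketCount.toNat → k < acc.length →
    (rs.foldl (fun acc p =>
        if p.1 == key then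
          let j := PySem.Int.floordiv (p.2 - start) bucketSize
          if 0 ≤ j ∧ j < bucketCount then acc.set j.toNat true else acc
        else acc) acc).getD k false
    = (acc.getD k false ||
       rs.any (fun p => decide (p.1 = key ∧ PySem.Int.floordiv (p.2 - start) bucketSize = (k : Int)))) := by
  intro rs
  induction rs with
  | nil => intro acc _ _; simp
  | cons p rs ih =>
    intro acc hlen hk
    simp only [List.foldl_cons, List.any_cons]
    by_cases hkey : p.1 = key
    · by_cases hcond : 0 ≤ PySem.Int.floordiv (p.2 - start) bucketSize ∧
          PySem.Int.floordiv (p.2 - start) bucketSize < bucketCount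
      · set j := PySem.Int.floordiv (p.2 - start) bucketSize with hj
        have hjn : j.toNat < acc.length := by omega
        rw [show (if p.1 == key then
              if 0 ≤ j ∧ j < bucketCount then acc.set j.toNat true else acc
            else acc) = acc.set j.toNat true by simp [hkey, hcond]]
        rw [ih _ (by simp [hlen]) (by simpa using hk)]
        by_cases hjk : j.toNat = k
        · have : j = (k : Int) := by omega
          simp [List.getD_eq_getElem?_getD, hkey, this, hk]
        · have : ¬ (j = (k : Int)) := by omega
          simp [List.getD_eq_getElem?_getD, hjk, hkey, this]
      · have hne : ¬ (PySem.Int.floordiv (p.2 - start) bucketSize = (k : Int)) := by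
          have : (k : Int) < bucketCount ∧ 0 ≤ (k:Int) := by omega
          omega
        rw [show (if p.1 == key then
              if 0 ≤ PySem.Int.floordiv (p.2 - start) bucketSize ∧ PySem.Int.floordiv (p.2 - start) bucketSize < bucketCount then acc.set (PySem.Int.floordiv (p.2 - start) bucketSize).toNat true else acc
            else acc) = acc by simp [hkey, hcond]]
        rw [ih _ hlen hk]
        simp [hkey, hne]
    · rw [show (if p.1 == key then
          if 0 ≤ PySem.Int.floordiv (p.2 - start) bucketSize ∧ PySem.Int.floordiv (p.2 - start) bucketSize < bucketCount then acc.set (PySem.Int.floordiv (p.2 - start) bucketSize).toNat true else acc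
        else acc) = acc by simp [hkey]]
      rw [ih _ hlen hk]
      simp [hkey]

-- 't lies in bucket i' is exactly '(t - start) // bucketSize = i' when bucketSize > 0.
theorem window_iff_floordiv (start bucketSize t i : Int) (hb : 0 < bucketSize) :
    (start + i * bucketSize ≤ t ∧ t ≤ start + i * bucketSize + bucketSize - 1)
    ↔ PySem.Int.floordiv (t - start) bucketSize = i := by
  rw [PySem.Int.floordiv_eq_iff_of_pos hb]
  have : (i + 1) * bucketSize = i * bucketSize + bucketSize := by ring
  omega

-- a non-positive bucketSize makes every bucket interval empty
theorem window_empty (start bucketSize t i : Int) (hb : ¬ 0 < bucketSize) :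
    ¬ (start + i * bucketSize ≤ t ∧ t ≤ start + i * bucketSize + bucketSize - 1) := by
  omega

-- the two bucket arrays coincide
theorem buckets_eq (records : List (Int × Int)) (key start bucketSize bucketCount : Int) :
    ((PySem.List.pyRange 0 bucketCount 1).map (fun i =>
      let tw := PySem.List.sorted ((records.filter (fun p => p.1 == key)).map (fun p => p.2)) (fun x => x) false
      let left := start + i * bucketSize
      let right := left + bucketSize - 1
      let idx := PySem.List.bisectLeft tw left
      decide (idx < tw.length ∧ tw.getD idx 0 ≤ right)))
    = (if bucketSize > 0 then
        records.foldl (fun acc p =>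
          if p.1 == key then
            let j := PySem.Int.floordiv (p.2 - start) bucketSize
            if 0 ≤ j ∧ j < bucketCount then acc.set j.toNat true else acc
          else acc) (List.replicate bucketCount.toNat false)
      else List.replicate bucketCount.toNat false) := by
  set tw := PySem.List.sorted ((records.filter (fun p => p.1 == key)).map (fun p => p.2)) (fun x => x) false with htw
  have hlenB : (if bucketSize > 0 then
        records.foldl (fun acc p =>
          if p.1 == key then
            let j := PySem.Int.floordiv (p.2 - start) bucketSize
            if 0 ≤ j ∧ j < bucketCount then acc.set j.toNat true else acc
          else acc) (List.replicate bucketCount.toNat false)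
      else List.replicate bucketCount.toNat false).length = bucketCount.toNat := by
    split_ifs
    · rw [mark_length]; simp
    · simp
  apply List.ext_getElem
  · rw [hlenB, List.length_map, PySem.List.length_pyRange_one]
    omega
  · intro k hkA hkB
    rw [hlenB] at hkB
    -- left side: decide of the window membership
    rw [List.getElem_map, PySem.List.getElem_pyRange_one]
    simp only [zero_add]
    rw [Bool.eq_iff_iff, decide_eq_true_iff]
    rw [bisect_window_iff tw (by
      simpa using PySem.List.sorted_pairwise
        ((records.filter (fun p => p.1 == key)).map (fun p => p.2)) (fun x => x))]
    have hmem : ∀ t : Int, t ∈ tw ↔ ∃ p ∈ records, p.1 = key ∧ p.2 = t := by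
      intro t
      rw [htw, PySem.List.mem_sorted]
      simp only [List.mem_map, List.mem_filter, beq_iff_eq]
      constructor
      · rintro ⟨p, ⟨hp, hpk⟩, hpt⟩; exact ⟨p, hp, hpk, hpt⟩
      · rintro ⟨p, hp, hpk, hpt⟩; exact ⟨p, ⟨hp, hpk⟩, hpt⟩
    by_cases hb : bucketSize > 0
    · simp only [hb, if_true]
      have h2 : k < (records.foldl (fun acc p =>
          if p.1 == key then
            let j := PySem.Int.floordiv (p.2 - start) bucketSize
            if 0 ≤ j ∧ j < bucketCount then acc.set j.toNat true else acc
          else acc) (List.replicate bucketCount.toNat false)).length := by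
        rw [mark_length]; simpa using hkB
      rw [← List.getD_eq_getElem _ false h2,
          mark_getD key start bucketSize bucketCount k records _ (by rw [List.length_replicate]) (by rw [List.length_replicate]; exact hkB)]
      rw [show (List.replicate bucketCount.toNat false).getD k false = false by simp,
         Bool.false_or, List.any_eq_true]
      simp only [decide_eq_true_iff]
      constructor
      · rintro ⟨t, ht, h1, h2⟩
        obtain ⟨p, hp, hpk, rfl⟩ := (hmem t).mp ht
        exact ⟨p, hp, hpk, (window_iff_floordiv start bucketSize p.2 (k : Int) hb).mp ⟨h1, h2⟩⟩
      · rintro ⟨p, hp, hpk, hfd⟩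
        obtain ⟨h1, h2⟩ := (window_iff_floordiv start bucketSize p.2 (k : Int) hb).mpr hfd
        exact ⟨p.2, (hmem p.2).mpr ⟨p, hp, hpk, rfl⟩, h1, h2⟩
    · simp only [hb, if_false]
      simp only [List.getElem_replicate, Bool.false_eq_true, iff_false]
      rintro ⟨t, _, h1, h2⟩
      exact window_empty start bucketSize t (k : Int) hb ⟨h1, h2⟩

-- ===== VERDICT (by name: the statement is the Claim_ definition above) =====
theorem wasAliveFast_spec : Claim_equal_wasAliveFast := by
  intro records key start bucketSize bucketCount needConsecutive _
  unfold Spec_wasAliveFast wasAliveFast wasAliveFast_alt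
  exact congrArg (fun l => pvRunScan l 0 needConsecutive)
    (buckets_eq records key start bucketSize bucketCount)
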